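-- pv_equiv track=rewrite | github.com/coffeinator/TelexService | txServiceProvider_base.py | _validOptionStartsWith
-- ===== SOURCE A (Python) =====
-- def _validOptionStartsWith(opt, validOptions):
-- 	ret = ''
-- 	for vo in validOptions:
-- 		if opt == vo:
-- 			return vo
-- 	for vo in validOptions:
-- 		if vo.startswith(opt):
-- 			if len(ret) > 0:
-- 				return ''
-- 			else:
-- 				ret = vo
-- 	return ret
-- ===== SOURCE B (Python) =====
-- def _validOptionStartsWith(opt, validOptions):
--     exact = False
--     first = ''
--     count = 0
--     for vo in validOptions:
--         if vo == opt:
--             exact = True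
--         if vo.startswith(opt):
--             if count == 0:
--                 first = vo
--             count += 1
--     if exact:
--         return opt
--     return first if count == 1 else ''
-- ===== Notes on version B (the rewrite author's own statement) =====
-- stated objective: alternative
-- what changed: Replaces A's two staged early-exit loops (exact-match scan, then accumulator scan that aborts on a second prefix match) by one single pass that folds an (exact-flag, first-match, match-count) accumulator over the list and decides once afterwards.
import Mathlib
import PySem

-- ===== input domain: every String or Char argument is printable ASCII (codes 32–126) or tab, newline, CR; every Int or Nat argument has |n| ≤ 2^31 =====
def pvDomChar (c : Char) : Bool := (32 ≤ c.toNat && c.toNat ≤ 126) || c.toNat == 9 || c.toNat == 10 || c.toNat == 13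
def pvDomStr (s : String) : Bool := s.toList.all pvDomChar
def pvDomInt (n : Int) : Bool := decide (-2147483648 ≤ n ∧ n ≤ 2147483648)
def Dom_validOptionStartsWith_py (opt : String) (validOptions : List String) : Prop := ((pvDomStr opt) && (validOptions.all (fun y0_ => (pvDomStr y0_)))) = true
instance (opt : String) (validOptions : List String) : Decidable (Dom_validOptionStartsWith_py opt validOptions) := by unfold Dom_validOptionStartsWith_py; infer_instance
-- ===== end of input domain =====

-- B replaces A's two staged early-exit loops by one single pass folding an
-- (exact-flag, first-prefix-match, match-count) accumulator, deciding once at the end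
-- (alternative decomposition, same cost).

-- ===== PORT A =====
-- second loop of A: accumulator ret, early return '' on a second prefix match
def pyLoop2 (opt : String) : List String → String → String
  | [], ret => ret
  | vo :: rest, ret =>
    if PySem.Str.startswith vo opt then
      if ret.length > 0 then "" else pyLoop2 opt rest vo
    else pyLoop2 opt rest ret

def validOptionStartsWith_py (opt : String) (validOptions : List String) : String :=
  -- first loop: return the first vo with opt == vo
  match validOptions.find? (fun vo => opt == vo) with
  | some vo => vo
  | none => pyLoop2 opt validOptions ""

-- ===== PORT B =====
-- one step of B's single loop over the state (exact, first, count)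
def altStep (opt : String) (st : Bool × String × Int) (vo : String) : Bool × String × Int :=
  let st1 := if vo == opt then (true, st.2.1, st.2.2) else st
  if PySem.Str.startswith vo opt then
    if st1.2.2 == 0 then (st1.1, vo, st1.2.2 + 1) else (st1.1, st1.2.1, st1.2.2 + 1)
  else st1

def validOptionStartsWith_py_alt (opt : String) (validOptions : List String) : String :=
  let st := validOptions.foldl (altStep opt) (false, "", 0)
  if st.1 then opt else if st.2.2 == 1 then st.2.1 else ""

-- ===== PRECONDITION & SPEC =====
def Spec_validOptionStartsWith_py (opt : String) (validOptions : List String) (out : String) : Prop := out = validOptionStartsWith_py_alt opt validOptions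
instance (opt : String) (validOptions : List String) (out : String) : Decidable (Spec_validOptionStartsWith_py opt validOptions out) := by unfold Spec_validOptionStartsWith_py; infer_instance

-- ===== CLAIM (what is proved, stated in full; the proofs are below) =====
def Claim_equal_validOptionStartsWith_py : Prop := ∀ (opt : String) (validOptions : List String), Dom_validOptionStartsWith_py opt validOptions → Spec_validOptionStartsWith_py opt validOptions (validOptionStartsWith_py opt validOptions)

-- ===== LEMMAS AND PROOFS =====

-- a prefix match is never the empty string unless opt itself is empty
theorem startswith_ne_empty {opt vo : String} (h : PySem.Str.startswith vo opt = true)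
    (hvo : vo = "") : opt = "" := by
  subst hvo
  have h0 : PySem.Chars.startswith [] opt.toList = true := by simpa using h
  have h1 : opt.toList <+: [] := (PySem.Chars.startswith_iff _ _).mp h0
  exact String.toList_eq_nil_iff.mp (List.prefix_nil.mp h1)

theorem length_pos_of_ne_empty (r : String) (h : r ≠ "") : r.length > 0 := by
  have h2 : r.toList ≠ [] := fun hn => h (String.toList_eq_nil_iff.mp hn)
  have h3 := List.length_pos_iff.mpr h2
  rwa [String.length_toList] at h3

-- with a nonempty accumulator, A's second loop returns the accumulator iff no further match
theorem pyLoop2_nonempty (opt : String) (l : List String) (r : String) (hr : r ≠ "") :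
    pyLoop2 opt l r =
      if l.filter (fun vo => PySem.Str.startswith vo opt) = [] then r else "" := by
  induction l generalizing r with
  | nil => simp [pyLoop2]
  | cons vo rest ih =>
    have hlen := length_pos_of_ne_empty r hr
    by_cases hp : PySem.Chars.startswith vo.toList opt.toList = true
    · simp [pyLoop2, hp, hlen]
    · simp [pyLoop2, hp, ih r hr]

-- starting from the empty accumulator, A's second loop computes the unique-match decision,
-- provided no matching element is itself empty
theorem pyLoop2_empty (opt : String) (l : List String)
    (h : ∀ vo ∈ l, PySem.Str.startswith vo opt = true → vo ≠ "") :
    pyLoop2 opt l "" =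
      match l.filter (fun vo => PySem.Str.startswith vo opt) with
      | [] => ""
      | [x] => x
      | _ :: _ :: _ => "" := by
  induction l with
  | nil => simp [pyLoop2]
  | cons vo rest ih =>
    by_cases hp : PySem.Chars.startswith vo.toList opt.toList = true
    · have hvo : vo ≠ "" := h vo (by simp) (by simpa using hp)
      have hrec := pyLoop2_nonempty opt rest vo hvo
      simp only [pyLoop2, PySem.Str.startswith_eq, hp, if_true, List.filter_cons]
      rw [if_neg (by simp [String.length_empty])]
      rw [hrec]
      by_cases hrest : rest.filter (fun vo => PySem.Str.startswith vo opt) = []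
      · simp only [PySem.Str.startswith_eq] at hrest
        simp [hrest]
      · simp only [PySem.Str.startswith_eq] at hrest
        rcases List.exists_cons_of_ne_nil hrest with ⟨y, ys, hy⟩
        simp [hy]
    · have hrest : ∀ v ∈ rest, PySem.Str.startswith v opt = true → v ≠ "" := by
        intro v hv; exact h v (by simp [hv])
      simp [pyLoop2, hp, ih hrest]

-- characterisation of B's fold: exact-flag is membership, count is the number of prefix
-- matches, and first is the first prefix match (once the count leaves zero it is frozen)
theorem altFold_char (opt : String) (l : List String) (e : Bool) (f : String) (c : Int)
    (hc : 0 ≤ c) :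
    l.foldl (altStep opt) (e, f, c) =
      (e || l.any (fun vo => vo == opt),
       if c = 0 then (l.filter (fun vo => PySem.Str.startswith vo opt)).headD f else f,
       c + ((l.filter (fun vo => PySem.Str.startswith vo opt)).length : Int)) := by
  induction l generalizing e f c with
  | nil => simp
  | cons vo rest ih =>
    by_cases hp : PySem.Chars.startswith vo.toList opt.toList = true
    · by_cases hc0 : c = 0
      · subst hc0
        have hstep : altStep opt (e, f, 0) vo = ((e || (vo == opt)), vo, 1) := by
          by_cases hv : vo = opt
          · have hstart : PySem.Chars.startswith opt.toList opt.toList = true := by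
              simp [PySem.Chars.startswith_iff]
            simp [altStep, hv, hstart]
          · simp [altStep, hv, hp]
        rw [List.foldl_cons, hstep, ih _ _ _ (by omega)]
        simp [hp, Prod.ext_iff, Bool.or_assoc]
        omega
      · have hcb : (c == 0) = false := by simpa using hc0
        have hc1 : ¬ (c + 1 = 0) := by omega
        have hstep : altStep opt (e, f, c) vo = ((e || (vo == opt)), f, c + 1) := by
          by_cases hv : vo = opt
          · have hstart : PySem.Chars.startswith opt.toList opt.toList = true := by
              simp [PySem.Chars.startswith_iff]
            simp [altStep, hv, hstart, hcb]
          · simp [altStep, hv, hp, hcb]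
        rw [List.foldl_cons, hstep, ih _ _ _ (by omega)]
        simp [hp, hc0, hc1, Prod.ext_iff, Bool.or_assoc]
        omega
    · have hvne : (vo == opt) = false := by
        by_cases hv : vo = opt
        · exfalso; apply hp; rw [hv]; simp [PySem.Chars.startswith_iff]
        · simpa using hv
      have hstep : altStep opt (e, f, c) vo = (e, f, c) := by
        simp [altStep, hvne, hp]
      rw [List.foldl_cons, hstep, ih _ _ _ hc]
      simp [hp, hvne]

-- B's count-based decision equals the three-way match on the filtered list
theorem alt_decision (m : List String) :
    (if ((m.length : Int) == 1) = true then m.headD "" else "") =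
      match m with
      | [] => ""
      | [x] => x
      | _ :: _ :: _ => "" := by
  match m with
  | [] => simp
  | [x] => simp
  | a :: b :: t =>
    have h : ¬ ((((a :: b :: t).length : Int) == 1) = true) := by
      simp only [List.length_cons, beq_iff_eq]
      push_cast
      omega
    rw [if_neg h]

-- ===== VERDICT (by name: the statement is the Claim_ definition above) =====
theorem validOptionStartsWith_py_spec : Claim_equal_validOptionStartsWith_py := by
  intro opt vs _
  unfold Spec_validOptionStartsWith_py validOptionStartsWith_py validOptionStartsWith_py_alt
  rw [altFold_char opt vs false "" 0 le_rfl]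
  simp only [Bool.false_or, Int.zero_add]
  by_cases hmem : opt ∈ vs
  · -- first loop of A fires: it returns the first vo with opt == vo, which is opt itself
    have hfind : vs.find? (fun vo => opt == vo) ≠ none := by
      rw [Ne, List.find?_eq_none]
      intro h
      exact absurd (by simp : (opt == opt) = true) (by simpa using h opt hmem)
    rcases Option.ne_none_iff_exists'.mp hfind with ⟨x, hx⟩
    have hxeq : opt = x := by
      have := List.find?_some hx
      simpa using this
    have hany : vs.any (fun vo => vo == opt) = true := by
      simp only [List.any_eq_true, beq_iff_eq]
      exact ⟨opt, hmem, rfl⟩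
    simp [hx, ← hxeq, hany]
  · -- opt not in the list: A's first loop falls through, B's exact-flag is false
    have hfind : vs.find? (fun vo => opt == vo) = none := by
      rw [List.find?_eq_none]
      intro x hx
      simp only [beq_iff_eq]
      intro hc; exact hmem (hc ▸ hx)
    have hany : vs.any (fun vo => vo == opt) = false := by
      simp only [List.any_eq_false, beq_iff_eq]
      intro x hx hc; exact hmem (hc ▸ hx)
    have hne : ∀ vo ∈ vs, PySem.Str.startswith vo opt = true → vo ≠ "" := by
      intro vo hvo hp hvoe
      have : opt = "" := startswith_ne_empty hp hvoe
      exact hmem (by rw [this, ← hvoe]; exact hvo)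
    rw [hfind, hany]
    simp only [Bool.false_eq_true, if_false]
    rw [pyLoop2_empty opt vs hne, ← alt_decision]
    split_ifs with h1 <;> simp_all
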